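-- pv_equiv track=rewrite | github.com/ismaelillo01/portalGesitonOdoo | zonasTrabajo/models/localidades.py | _normalize_trailing_article
-- ===== SOURCE A (Python) =====
-- def _normalize_trailing_article(value):
--     for article in ('El', 'La', 'Los', 'Las'):
--         suffix = f" ({article})"
--         if value.endswith(suffix):
--             base = value[:-len(suffix)].strip()
--             if base:
--                 return f"{article} {base}"
--     return value
-- ===== SOURCE B (Python) =====
-- def _normalize_trailing_article(value):
--     # Single reverse character scan: walk back from the final ')' collecting the
--     # parenthesized token character by character, then validate it in one shot.
--     i = len(value) - 1
--     if i < 0 or value[i] != ')':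
--         return value
--     j = i - 1
--     token = []
--     while j >= 0 and value[j] != ' ' and value[j] != '(':
--         token.append(value[j])
--         j -= 1
--     if j <= 0 or value[j] != '(' or value[j - 1] != ' ':
--         return value
--     article = ''.join(reversed(token))
--     if article not in ('El', 'La', 'Los', 'Las'):
--         return value
--     base = value[:j - 1].strip()
--     if not base:
--         return value
--     return f"{article} {base}"
-- ===== Notes on version B (the rewrite author's own statement) =====
-- stated objective: alternative
-- what changed: B does one reverse character-by-character scan: it walks back from the final ')' collecting the parenthesized token into an accumulator until it hits ' ' or '(', then validates the delimiters and the collected token once, instead of A's loop testing each of the four articles as a whole suffix with endswith.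
import Mathlib
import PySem

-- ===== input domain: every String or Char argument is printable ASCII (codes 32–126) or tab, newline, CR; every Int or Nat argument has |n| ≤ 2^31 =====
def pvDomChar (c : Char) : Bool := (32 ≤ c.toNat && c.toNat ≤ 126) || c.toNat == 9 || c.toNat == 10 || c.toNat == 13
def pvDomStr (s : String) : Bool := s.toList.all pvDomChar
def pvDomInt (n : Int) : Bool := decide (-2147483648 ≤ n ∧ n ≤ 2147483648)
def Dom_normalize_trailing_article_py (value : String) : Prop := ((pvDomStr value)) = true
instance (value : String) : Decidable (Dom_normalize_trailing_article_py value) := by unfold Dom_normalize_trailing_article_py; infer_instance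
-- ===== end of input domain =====

-- B replaces A's four endswith-suffix tests by one reverse character-by-character scan that collects the trailing parenthesized token and validates it once; alternative decomposition, same cost.

-- ===== PORT A =====
-- the tuple ('El', 'La', 'Los', 'Las'): iterated by A's loop, membership-tested by B
def pvArticlesA : List (List Char) := [['E','l'], ['L','a'], ['L','o','s'], ['L','a','s']]

-- A's for-loop: try each article's suffix " (article)" in order; fall through to the next on no match or empty base
def pvLoopA (value : List Char) : List (List Char) → List Char
  | [] => value
  | article :: rest =>
      let suffix : List Char := ' ' :: '(' :: (article ++ [')'])
      if PySem.Chars.endswith value suffix then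
        let base := PySem.Chars.strip (PySem.List.slice value none (some (-(suffix.length : Int))))
        if base ≠ [] then article ++ ' ' :: base
        else pvLoopA value rest
      else pvLoopA value rest

def normalize_trailing_article_py (value : String) : String :=
  String.ofList (pvLoopA value.toList pvArticlesA)

-- ===== PORT B =====
-- B's while-loop: walk index j downwards collecting chars until ' ' or '(' (or j < 0);
-- encoded argument is python's j + 1 (0 = python j = -1, the 'while' guard j >= 0 failing → token dropped);
-- consing v[j] onto the accumulator while walking down IS python's append-then-reverse token.
-- getD is exact here: every index probed is < v.length (the scan starts at len-2).
def pvScanB (v : List Char) : Nat → List Char → Option (Nat × List Char)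
  | 0, _ => none
  | (e+1), acc =>
      let c := v.getD e ' '
      if c = ' ' ∨ c = '(' then some (e, acc)
      else pvScanB v e (c :: acc)

-- B: guard the final ')', reverse-scan the token, then the three-way guard, membership, base
def pvParseB (v : List Char) : List Char :=
  if v.getLast? = some ')' then
    match pvScanB v (v.length - 1) [] with
    | none => v                                   -- python j reached -1: 'j <= 0' fires
    | some (j, article) =>
        if j = 0 then v
        else if v.getD j ' ' ≠ '(' ∨ v.getD (j-1) ' ' ≠ ' ' then v
        else if article ∈ pvArticlesA then
          let base := PySem.Chars.strip (v.take (j-1))   -- value[:j-1], j-1 ≥ 0 here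
          if base = [] then v else article ++ ' ' :: base
        else v
  else v

def normalize_trailing_article_py_alt (value : String) : String :=
  String.ofList (pvParseB value.toList)

-- ===== PRECONDITION & SPEC =====
def Spec_normalize_trailing_article_py (value : String) (out : String) : Prop := out = normalize_trailing_article_py_alt value
instance (value : String) (out : String) : Decidable (Spec_normalize_trailing_article_py value out) := by unfold Spec_normalize_trailing_article_py; infer_instance

-- ===== CLAIM (what is proved, stated in full; the proofs are below) =====
def Claim_equal_normalize_trailing_article_py : Prop := ∀ (value : String), Dom_normalize_trailing_article_py value → Spec_normalize_trailing_article_py value (normalize_trailing_article_py value)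

-- ===== LEMMAS AND PROOFS =====

-- the suffix " (a)" built from an article a
def pvSfx (a : List Char) : List Char := ' ' :: '(' :: (a ++ [')'])

-- two suffixes of one list: the shorter is a suffix of the longer
lemma pv_suffix_suffix {s t v : List Char} (h1 : s <:+ v) (h2 : t <:+ v)
    (h : s.length ≤ t.length) : s <:+ t := by
  rw [← List.reverse_prefix] at h1 h2 ⊢
  exact List.prefix_of_prefix_length_le h1 h2 (by simpa using h)

-- value[: -k] for 0 < k ≤ len
lemma pv_slice_neg_to (xs : List Char) (k : Nat) (hk0 : 0 < k) (hk : k ≤ xs.length) :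
    PySem.List.slice xs none (some (-(k : Int))) = xs.take (xs.length - k) := by
  unfold PySem.List.slice PySem.List.clampIdx
  have h2 : ¬ ((xs.length : Int) + -(k : Int) < 0) := by omega
  have h3 : ((xs.length : Int) + -(k : Int)).toNat = xs.length - k := by omega
  simp [h2, h3, hk0]

-- at most one article suffix can match: any matching suffix nests with pvSfx a
lemma pv_end_unique {pre a b : List Char}
    (h : PySem.Chars.endswith (pre ++ pvSfx a) (pvSfx b) = true) :
    pvSfx b <:+ pvSfx a ∨ pvSfx a <:+ pvSfx b := by
  rw [PySem.Chars.endswith_iff] at h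
  have ha : pvSfx a <:+ pre ++ pvSfx a := ⟨pre, rfl⟩
  rcases le_total (pvSfx b).length (pvSfx a).length with hle | hle
  · exact Or.inl (pv_suffix_suffix h ha hle)
  · exact Or.inr (pv_suffix_suffix ha h hle)

-- A's loop skips every article whose suffix does not match
lemma pv_loop_skip (v : List Char) (l : List (List Char))
    (h : ∀ b ∈ l, PySem.Chars.endswith v (pvSfx b) = false) : pvLoopA v l = v := by
  induction l with
  | nil => rfl
  | cons b rest ih =>
      have hb := h b (by simp)
      simp only [pvSfx] at hb
      simp only [pvLoopA, hb]
      exact ih (fun c hc => h c (by simp [hc]))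

-- when no article suffix matches, A returns the input
lemma pv_A_nomatch (v : List Char)
    (h : ∀ a ∈ pvArticlesA, PySem.Chars.endswith v (pvSfx a) = false) :
    pvLoopA v pvArticlesA = v := pv_loop_skip v pvArticlesA h

-- A's base value in the matched branch
lemma pv_A_base (pre a : List Char) (n : Int) (hn : n = ((a.length + 3 : Nat) : Int)) :
    PySem.Chars.strip (PySem.List.slice (pre ++ pvSfx a) none (some (-n)))
      = PySem.Chars.strip pre := by
  subst hn
  have hlen : (pre ++ pvSfx a).length = pre.length + (a.length + 3) := by simp [pvSfx]
  rw [pv_slice_neg_to _ _ (by omega) (by rw [hlen]; omega), hlen]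
  have : pre.length + (a.length + 3) - (a.length + 3) = pre.length := by omega
  rw [this, List.take_left]

-- A's loop on an input of the matched shape pre ++ " (a)"
lemma pv_A_match (pre a : List Char) (ha : a ∈ pvArticlesA) :
    pvLoopA (pre ++ pvSfx a) pvArticlesA =
      (if PySem.Chars.strip pre = [] then pre ++ pvSfx a
       else a ++ ' ' :: PySem.Chars.strip pre) := by
  have hT : PySem.Chars.endswith (pre ++ pvSfx a) (pvSfx a) = true := by
    rw [PySem.Chars.endswith_iff]; exact ⟨pre, rfl⟩
  have hF : ∀ b : List Char, ¬ (pvSfx b <:+ pvSfx a ∨ pvSfx a <:+ pvSfx b) →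
      PySem.Chars.endswith (pre ++ pvSfx a) (pvSfx b) = false := by
    intro b hb
    apply Bool.eq_false_iff.mpr
    intro hcon
    exact hb (pv_end_unique hcon)
  simp only [pvArticlesA] at ha
  simp only [List.mem_cons, List.not_mem_nil, or_false] at ha
  have base5El : PySem.Chars.strip (PySem.List.slice (pre ++ [' ', '(', 'E', 'l', ')']) none (some (-5)))
      = PySem.Chars.strip pre := by
    have := pv_A_base pre ['E','l'] 5 (by norm_num); simpa [pvSfx] using this
  have base5La : PySem.Chars.strip (PySem.List.slice (pre ++ [' ', '(', 'L', 'a', ')']) none (some (-5)))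
      = PySem.Chars.strip pre := by
    have := pv_A_base pre ['L','a'] 5 (by norm_num); simpa [pvSfx] using this
  have base6Los : PySem.Chars.strip (PySem.List.slice (pre ++ [' ', '(', 'L', 'o', 's', ')']) none (some (-6)))
      = PySem.Chars.strip pre := by
    have := pv_A_base pre ['L','o','s'] 6 (by norm_num); simpa [pvSfx] using this
  have base6Las : PySem.Chars.strip (PySem.List.slice (pre ++ [' ', '(', 'L', 'a', 's', ')']) none (some (-6)))
      = PySem.Chars.strip pre := by
    have := pv_A_base pre ['L','a','s'] 6 (by norm_num); simpa [pvSfx] using this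
  rcases ha with rfl | rfl | rfl | rfl
  · have f2 := hF ['L','a'] (by decide)
    have f3 := hF ['L','o','s'] (by decide)
    have f4 := hF ['L','a','s'] (by decide)
    simp only [pvSfx, List.cons_append, List.nil_append] at hT f2 f3 f4 ⊢
    simp only [pvArticlesA, pvLoopA]
    simp [hT, f2, f3, f4]
    rw [base5El]
  · have f2 := hF ['E','l'] (by decide)
    have f3 := hF ['L','o','s'] (by decide)
    have f4 := hF ['L','a','s'] (by decide)
    simp only [pvSfx, List.cons_append, List.nil_append] at hT f2 f3 f4 ⊢
    simp only [pvArticlesA, pvLoopA]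
    simp [hT, f2, f3, f4]
    rw [base5La]
  · have f2 := hF ['E','l'] (by decide)
    have f3 := hF ['L','a'] (by decide)
    have f4 := hF ['L','a','s'] (by decide)
    simp only [pvSfx, List.cons_append, List.nil_append] at hT f2 f3 f4 ⊢
    simp only [pvArticlesA, pvLoopA]
    simp [hT, f2, f3, f4]
    rw [base6Los]
  · have f2 := hF ['E','l'] (by decide)
    have f3 := hF ['L','a'] (by decide)
    have f4 := hF ['L','o','s'] (by decide)
    simp only [pvSfx, List.cons_append, List.nil_append] at hT f2 f3 f4 ⊢
    simp only [pvArticlesA, pvLoopA]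
    simp [hT, f2, f3, f4]
    rw [base6Las]

-- a successful scan stop: the probed char is ' ' or '('
lemma pv_scan_stop (v : List Char) (n : Nat) (acc : List Char)
    (h : v.getD n ' ' = ' ' ∨ v.getD n ' ' = '(') :
    pvScanB v (n+1) acc = some (n, acc) := by
  simp only [pvScanB]
  rw [if_pos h]

-- a scan step over a non-stop char conses it onto the accumulator
lemma pv_scan_step (v : List Char) (n : Nat) (acc : List Char)
    (h : ¬ (v.getD n ' ' = ' ' ∨ v.getD n ' ' = '(')) :
    pvScanB v (n+1) acc = pvScanB v n (v.getD n ' ' :: acc) := by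
  simp only [pvScanB]
  rw [if_neg h]

-- B's scan skips over a block of non-stop characters, collecting them in order
lemma pv_scan_collect (v w a : List Char) (acc : List Char)
    (hw : v.take (w.length + a.length) = w ++ a)
    (ha : ∀ c ∈ a, c ≠ ' ' ∧ c ≠ '(') :
    pvScanB v (w.length + a.length) acc = pvScanB v w.length (a ++ acc) := by
  induction a using List.reverseRecOn generalizing acc with
  | nil => simp
  | append_singleton b c ih =>
      have hlen : w.length + (b ++ [c]).length = (w.length + b.length) + 1 := by
        simp only [List.length_append, List.length_cons, List.length_nil]; omega
      have hlt : w.length + b.length < v.length := by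
        have := congrArg List.length hw
        simp only [List.length_take, List.length_append, List.length_cons,
          List.length_nil] at this
        omega
      have h2 : (w ++ (b ++ [c])).getD (w.length + b.length) ' ' = c := by
        rw [show w ++ (b ++ [c]) = (w ++ b) ++ [c] by simp, List.getD_eq_getElem?_getD,
          List.getElem?_append_right (by simp)]
        simp
      have hget : v.getD (w.length + b.length) ' ' = c := by
        have h1 : (v.take (w.length + (b ++ [c]).length)).getD (w.length + b.length) ' ' = c := by
          rw [hw]; exact h2
        rw [List.getD_eq_getElem?_getD,
          List.getElem?_take_of_lt (by rw [hlen]; omega)] at h1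
        rw [List.getD_eq_getElem?_getD]
        exact h1
      have hc := ha c (by simp)
      have hw' : v.take (w.length + b.length) = w ++ b := by
        have he : v.take (w.length + b.length)
            = (v.take (w.length + (b ++ [c]).length)).take (w.length + b.length) := by
          rw [List.take_take]
          congr 1
          rw [hlen]
          omega
        rw [he, hw, show w ++ (b ++ [c]) = (w ++ b) ++ [c] by simp,
          List.take_append_of_le_length (by simp), List.take_of_length_le (by simp)]
      calc pvScanB v (w.length + (b ++ [c]).length) acc
          = pvScanB v ((w.length + b.length) + 1) acc := by rw [hlen]
        _ = pvScanB v (w.length + b.length) (v.getD (w.length + b.length) ' ' :: acc) :=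
            pv_scan_step v _ acc (by rw [hget]; exact fun h => h.elim hc.1 hc.2)
        _ = pvScanB v w.length (b ++ (c :: acc)) := by
            rw [hget]
            exact ih (c :: acc) hw' (fun d hd => ha d (by simp [hd]))
        _ = pvScanB v w.length ((b ++ [c]) ++ acc) := by simp

-- soundness of B's scan: a successful stop yields the stop position, the collected segment, and its purity
lemma pv_scan_sound (v : List Char) : ∀ e acc j art, e ≤ v.length →
    pvScanB v e acc = some (j, art) →
    j < e ∧ art = (v.take e).drop (j+1) ++ acc := by
  intro e
  induction e with
  | zero => intro acc j art _ h; simp [pvScanB] at h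
  | succ n ih =>
      intro acc j art hle h
      by_cases hstop : v.getD n ' ' = ' ' ∨ v.getD n ' ' = '('
      · rw [pv_scan_stop v n acc hstop] at h
        obtain ⟨rfl, rfl⟩ : n = j ∧ acc = art := by
          injection h with h'; injection h' with h1 h2; exact ⟨h1, h2⟩
        refine ⟨by omega, ?_⟩
        rw [List.drop_eq_nil_of_le (by simp only [List.length_take]; omega)]
        simp
      · rw [pv_scan_step v n acc hstop] at h
        obtain ⟨hj, hart⟩ := ih _ j art (by omega) h
        have hlt : n < v.length := by omega
        have htake : v.take (n+1) = v.take n ++ [v.getD n ' '] := by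
          rw [List.take_add_one, List.getD_eq_getElem?_getD,
            List.getElem?_eq_getElem hlt]
          rfl
        refine ⟨by omega, ?_⟩
        rw [htake, List.drop_append_of_le_length (by simp only [List.length_take]; omega),
          hart]
        simp

-- B's value on an input of the matched shape pre ++ " (a)"
lemma pv_B_match (pre a : List Char) (ha : a ∈ pvArticlesA)
    (hsp : ∀ c ∈ a, c ≠ ' ' ∧ c ≠ '(') :
    pvParseB (pre ++ pvSfx a) =
      (if PySem.Chars.strip pre = [] then pre ++ pvSfx a
       else a ++ ' ' :: PySem.Chars.strip pre) := by
  set v := pre ++ pvSfx a with hv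
  have hlen : v.length = pre.length + a.length + 3 := by
    simp only [hv, pvSfx, List.length_append, List.length_cons, List.length_nil]
    omega
  have hlast : v.getLast? = some ')' := by
    rw [hv, show pre ++ pvSfx a = (pre ++ ' ' :: '(' :: a) ++ [')'] by simp [pvSfx],
      List.getLast?_concat]
  have hsplit : v = (pre ++ [' ', '(']) ++ (a ++ [')']) := by simp [hv, pvSfx]
  have htake : v.take ((pre ++ [' ', '(']).length + a.length) = (pre ++ [' ', '(']) ++ a := by
    rw [hsplit, List.take_append, List.take_of_length_le (by simp),
      show (pre ++ [' ', '(']).length + a.length - (pre ++ [' ', '(']).length = a.length by omega,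
      List.take_append_of_le_length (le_refl _), List.take_length]
  have hgetp1 : v.getD (pre.length + 1) ' ' = '(' := by
    rw [hsplit, List.getD_eq_getElem?_getD,
      List.getElem?_append_left (by
        simp only [List.length_append, List.length_cons, List.length_nil]; omega),
      List.getElem?_append_right (by omega)]
    simp
  have hgetp : v.getD pre.length ' ' = ' ' := by
    rw [hsplit, List.getD_eq_getElem?_getD,
      List.getElem?_append_left (by
        simp only [List.length_append, List.length_cons, List.length_nil]; omega),
      List.getElem?_append_right (le_refl _)]
    simp
  have hw : pvScanB v (v.length - 1) [] = pvScanB v (pre.length + 2) a := by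
    have he : v.length - 1 = (pre ++ [' ', '(']).length + a.length := by
      simp only [List.length_append, List.length_cons, List.length_nil, hlen]
      omega
    rw [he, pv_scan_collect v (pre ++ [' ', '(']) a [] htake hsp]
    simp
  have hscan : pvScanB v (pre.length + 2) a = some (pre.length + 1, a) :=
    pv_scan_stop v (pre.length + 1) a (Or.inr hgetp1)
  unfold pvParseB
  rw [if_pos hlast, hw, hscan]
  simp only
  rw [if_neg (by omega)]
  rw [if_neg (by
    rw [hgetp1, show pre.length + 1 - 1 = pre.length by omega, hgetp]
    simp)]
  rw [if_pos (by simpa using ha),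
    show pre.length + 1 - 1 = pre.length by omega,
    show v.take pre.length = pre by
      rw [hv]; unfold pvSfx; rw [List.take_append_of_le_length (le_refl _), List.take_length]]

-- when no article suffix matches, B returns the input
lemma pv_B_nomatch (v : List Char)
    (h : ∀ a ∈ pvArticlesA, PySem.Chars.endswith v (pvSfx a) = false) :
    pvParseB v = v := by
  unfold pvParseB
  by_cases hlast : v.getLast? = some ')'
  swap
  · rw [if_neg hlast]
  rw [if_pos hlast]
  obtain ⟨u, rfl⟩ : ∃ u, v = u ++ [')'] := by
    obtain ⟨u, hu⟩ := List.getLast?_eq_some_iff.mp hlast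
    exact ⟨u, hu⟩
  have hlenv : (u ++ [')']).length - 1 = u.length := by simp
  cases hm : pvScanB (u ++ [')']) ((u ++ [')']).length - 1) [] with
  | none => rfl
  | some p =>
      obtain ⟨j, art⟩ := p
      obtain ⟨hj, hart⟩ := pv_scan_sound (u ++ [')']) _ [] j art (by simp) hm
      rw [hlenv] at hj
      rw [hlenv, List.take_left] at hart
      simp only
      by_cases hj0 : j = 0
      · rw [if_pos hj0]
      rw [if_neg hj0]
      by_cases hguard : (u ++ [')']).getD j ' ' ≠ '(' ∨ (u ++ [')']).getD (j-1) ' ' ≠ ' '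
      · rw [if_pos hguard]
      rw [if_neg hguard]
      have hg1 : (u ++ [')']).getD j ' ' = '(' := by
        by_contra hc; exact hguard (Or.inl hc)
      have hg2 : (u ++ [')']).getD (j-1) ' ' = ' ' := by
        by_contra hc; exact hguard (Or.inr hc)
      by_cases hmem : art ∈ pvArticlesA
      swap
      · rw [if_neg hmem]
      exfalso
      have hu1 : u.getD j ' ' = '(' := by
        rw [List.getD_eq_getElem?_getD, List.getElem?_append_left hj] at hg1
        rw [List.getD_eq_getElem?_getD]
        exact hg1
      have hu2 : u.getD (j-1) ' ' = ' ' := by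
        rw [List.getD_eq_getElem?_getD, List.getElem?_append_left (by omega : j - 1 < u.length)] at hg2
        rw [List.getD_eq_getElem?_getD]
        exact hg2
      -- reconstruct the tail of u from position j-1 on
      have hdrop : u.drop (j-1) = ' ' :: '(' :: u.drop (j+1) := by
        rw [List.drop_eq_getElem_cons (by omega : j - 1 < u.length)]
        rw [show j - 1 + 1 = j by omega]
        rw [List.drop_eq_getElem_cons hj]
        congr 1
        · rw [← hu2, List.getD_eq_getElem?_getD, List.getElem?_eq_getElem (by omega)]
          rfl
        congr 1
        rw [← hu1, List.getD_eq_getElem?_getD, List.getElem?_eq_getElem hj]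
        rfl
      have hsfx : pvSfx art <:+ u ++ [')'] := by
        refine ⟨u.take (j-1), ?_⟩
        rw [pvSfx]
        have : art ++ [')'] = u.drop (j+1) ++ [')'] := by rw [hart]; simp
        rw [this, show u.take (j-1) ++ ' ' :: '(' :: (u.drop (j+1) ++ [')'])
            = (u.take (j-1) ++ (' ' :: '(' :: u.drop (j+1))) ++ [')'] by simp,
          ← hdrop, List.take_append_drop]
      have := h art hmem
      rw [← PySem.Chars.endswith_iff] at hsfx
      rw [this] at hsfx
      exact Bool.false_ne_true hsfx

-- the four articles contain no stop character
lemma pv_chars_El : ∀ c ∈ (['E','l'] : List Char), c ≠ ' ' ∧ c ≠ '(' := by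
  intro c hc
  fin_cases hc <;> exact ⟨by decide, by decide⟩
lemma pv_chars_La : ∀ c ∈ (['L','a'] : List Char), c ≠ ' ' ∧ c ≠ '(' := by
  intro c hc
  fin_cases hc <;> exact ⟨by decide, by decide⟩
lemma pv_chars_Los : ∀ c ∈ (['L','o','s'] : List Char), c ≠ ' ' ∧ c ≠ '(' := by
  intro c hc
  fin_cases hc <;> exact ⟨by decide, by decide⟩
lemma pv_chars_Las : ∀ c ∈ (['L','a','s'] : List Char), c ≠ ' ' ∧ c ≠ '(' := by
  intro c hc
  fin_cases hc <;> exact ⟨by decide, by decide⟩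

lemma pv_main (v : List Char) : pvLoopA v pvArticlesA = pvParseB v := by
  have hcase : ∀ a : List Char, a ∈ pvArticlesA → (∀ c ∈ a, c ≠ ' ' ∧ c ≠ '(') →
      PySem.Chars.endswith v (pvSfx a) = true → pvLoopA v pvArticlesA = pvParseB v := by
    intro a ha hsp hend
    obtain ⟨pre, hpre⟩ := (PySem.Chars.endswith_iff v (pvSfx a)).mp hend
    subst hpre
    rw [pv_A_match pre a ha, pv_B_match pre a ha hsp]
  by_cases h1 : PySem.Chars.endswith v (pvSfx ['E','l']) = true
  · exact hcase _ (by decide) pv_chars_El h1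
  by_cases h2 : PySem.Chars.endswith v (pvSfx ['L','a']) = true
  · exact hcase _ (by decide) pv_chars_La h2
  by_cases h3 : PySem.Chars.endswith v (pvSfx ['L','o','s']) = true
  · exact hcase _ (by decide) pv_chars_Los h3
  by_cases h4 : PySem.Chars.endswith v (pvSfx ['L','a','s']) = true
  · exact hcase _ (by decide) pv_chars_Las h4
  have hall : ∀ a ∈ pvArticlesA, PySem.Chars.endswith v (pvSfx a) = false := by
    intro a ha
    simp only [pvArticlesA, List.mem_cons, List.not_mem_nil, or_false] at ha
    rcases ha with rfl | rfl | rfl | rfl <;> simp_all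
  rw [pv_A_nomatch v hall, pv_B_nomatch v hall]

-- ===== VERDICT (by name: the statement is the Claim_ definition above) =====
theorem normalize_trailing_article_py_spec : Claim_equal_normalize_trailing_article_py := by
  intro value _
  show _ = _
  unfold normalize_trailing_article_py normalize_trailing_article_py_alt
  exact congrArg String.ofList (pv_main value.toList)
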